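-- pv_equiv track=rewrite | github.com/sophieKaelin/AdventOfCode2019 | day4.py | continueRem
-- ===== SOURCE A (Python) =====
-- def continueRem(item, dig):
--     stri = str(item)
--     if len(stri) == 0:
--         return 0
--     if len(stri) == 1:
--         if int(stri) == dig:
--             return 0
--         else:
--             return item
--     if(int(stri[0]) == dig):
--         return continueRem(int(stri[1:]), dig)
--     else:
--         return item
-- ===== SOURCE B (Python) =====
-- def continueRem(item, dig):
--     # Arithmetic digit-peeling: no string conversions. Repeatedly drop the
--     # leading decimal digit while it equals dig (leading zeros vanish by
--     # arithmetic automatically); a final single digit equal to dig becomes 0.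
--     while True:
--         if item < 10:
--             return 0 if item == dig else item
--         p = 1
--         while p * 10 <= item:
--             p *= 10
--         if item // p != dig:
--             return item
--         item %= p
-- ===== Notes on version B (the rewrite author's own statement) =====
-- stated objective: alternative
-- what changed: Replaces A's str()/int() recursion with a pure-arithmetic while loop that finds the leading power of ten and peels the leading digit with // and %; Pre_ excludes negative item, on which A raises ValueError at int('-').
-- outside the precondition, e.g. on continueRem(-5, 3): A raises ValueError, B returns -5
import Mathlib
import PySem

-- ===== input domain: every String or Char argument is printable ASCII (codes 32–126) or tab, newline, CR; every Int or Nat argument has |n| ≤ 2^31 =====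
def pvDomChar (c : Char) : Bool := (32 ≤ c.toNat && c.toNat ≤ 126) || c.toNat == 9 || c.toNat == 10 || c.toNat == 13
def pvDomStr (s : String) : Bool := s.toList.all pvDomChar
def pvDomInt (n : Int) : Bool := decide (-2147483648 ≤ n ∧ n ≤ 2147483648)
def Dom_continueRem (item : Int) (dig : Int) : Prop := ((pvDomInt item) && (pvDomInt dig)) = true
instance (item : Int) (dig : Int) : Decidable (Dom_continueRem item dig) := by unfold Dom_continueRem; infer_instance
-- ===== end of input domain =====

-- ===== PORT A =====
-- Literal transliteration of A's digit-peeling recursion; the fuel argument only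
-- makes the same computation total (A recurses on int(stri[1:]) < item, so
-- item.natAbs + 1 steps always suffice); branch order and intermediate values follow A.
def continueRemFuel : Nat → Int → Int → Int
  | 0, _, _ => 0
  | fuel + 1, item, dig =>
    let stri := PySem.Int.toChars item            -- stri = str(item)
    if stri.length == 0 then 0                    -- if len(stri) == 0: return 0
    else if stri.length == 1 then                 -- if len(stri) == 1:
      match PySem.Int.ofChars? stri with          --   int(stri)
      | some v => if v == dig then 0 else item    --   return 0 if == dig else item
      | none => 0                                 -- (unreachable: a single char of str(int) is a digit)
    else
      match PySem.List.pyGet? stri 0 with         -- stri[0]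
      | none => 0                                 -- (unreachable: stri nonempty)
      | some c =>
        match PySem.Int.ofChars? [c] with         -- int(stri[0])
        | none => 0                               -- ValueError on '-' (negative item): outside Pre_
        | some d0 =>
          if d0 == dig then                       -- if int(stri[0]) == dig:
            match PySem.Int.ofChars? (PySem.List.slice stri (some 1) none) with  -- int(stri[1:])
            | none => 0                           -- (unreachable for nonnegative item)
            | some r => continueRemFuel fuel r dig  -- return continueRem(int(stri[1:]), dig)
          else item                               -- else: return item

def continueRem (item : Int) (dig : Int) : Int :=
  continueRemFuel (item.natAbs + 1) item dig

-- ===== PORT B =====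
-- B: pure-arithmetic digit peeling.  Inner while loop: largest power of ten ≤ item
-- (fuel item.natAbs only makes it total: p grows tenfold each step).
def findPFuel : Nat → Int → Int → Int
  | 0, _, p => p
  | f + 1, item, p => if p * 10 ≤ item then findPFuel f item (p * 10) else p

-- Outer while loop of B (fuel item.natAbs + 1 only makes it total: item % p < item).
def altFuel : Nat → Int → Int → Int
  | 0, item, _ => item
  | f + 1, item, dig =>
    if item < 10 then (if item == dig then 0 else item)
    else
      let p := findPFuel item.natAbs item 1
      if PySem.Int.floordiv item p != dig then item
      else altFuel f (PySem.Int.mod item p) dig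

def continueRem_alt (item : Int) (dig : Int) : Int :=
  altFuel (item.natAbs + 1) item dig

-- ===== PRECONDITION & SPEC =====
-- Pre_ excludes negative item: there str(item) starts with '-' and A raises
-- ValueError at int(stri[0]).
def Pre_continueRem (item : Int) (dig : Int) : Prop := 0 ≤ item
instance (item : Int) (dig : Int) : Decidable (Pre_continueRem item dig) := by unfold Pre_continueRem; infer_instance
def pvWitness_continueRem : Int × Int := (7075, 7)

def Spec_continueRem (item : Int) (dig : Int) (out : Int) : Prop := out = continueRem_alt item dig
instance (item : Int) (dig : Int) (out : Int) : Decidable (Spec_continueRem item dig out) := by unfold Spec_continueRem; infer_instance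

-- ===== CLAIM (what is proved, stated in full; the proofs are below) =====
def Claim_equal_continueRem : Prop := ∀ (item : Int) (dig : Int), Dom_continueRem item dig → Pre_continueRem item dig → Spec_continueRem item dig (continueRem item dig)
-- ===== LEMMAS AND PROOFS =====

-- The numeric value of a decimal digit string (leading zeros allowed).
def pvVal (ds : List Char) : Nat := ds.foldl (fun a c => a * 10 + (c.toNat - 48)) 0

theorem drop_digits {l : List Char} (hd : ∀ c ∈ l, c.isDigit = true) :
    List.dropWhile PySem.Int.isIntSpace l = l := by
  cases l with
  | nil => rfl
  | cons c t =>
    rw [List.dropWhile_cons]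
    have : PySem.Int.isIntSpace c = false := by
      have h := hd c (by simp)
      unfold PySem.Int.isIntSpace
      simp only [Bool.or_eq_false_iff, decide_eq_false_iff_not]
      refine ⟨⟨⟨⟨⟨?_, ?_⟩, ?_⟩, ?_⟩, ?_⟩, ?_⟩ <;> (rintro rfl; exact absurd h (by decide))
    simp [this]

-- int(s) on a nonempty all-digit string returns its value (Python accepts leading zeros).
theorem pv_parse_digits (ds : List Char) (hne : ds ≠ []) (hd : ∀ c ∈ ds, c.isDigit = true) :
    PySem.Int.ofChars? ds = some ((pvVal ds : Nat) : Int) := by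
  have htrim : (List.dropWhile PySem.Int.isIntSpace
      (List.dropWhile PySem.Int.isIntSpace ds).reverse).reverse = ds := by
    rw [drop_digits hd, drop_digits (by simpa using hd), List.reverse_reverse]
  unfold PySem.Int.ofChars?
  rw [htrim]
  cases ds with
  | nil => exact absurd rfl hne
  | cons c t =>
    conv_lhs => whnf
    split
    case _ ds h =>
      injection h with h1 h2; subst h1
      exact absurd (hd _ (List.mem_cons_self ..)) (by decide)
    case _ ds h =>
      injection h with h1 h2; subst h1
      exact absurd (hd _ (List.mem_cons_self ..)) (by decide)
    case _ ds h1 h2 =>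
      have hrhs : (some ((pvVal (c :: t) : Nat) : Int) : Option Int)
          = Option.map (fun n : Int => n) (do let a ← some (pvVal (c :: t)); pure ((a : Nat) : Int)) := rfl
      rw [hrhs]
      congr 1
      congr 1
      have hdc : c.isDigit = true := hd _ (List.mem_cons_self ..)
      have hdt : ∀ x ∈ t, x.isDigit = true := fun x hx => hd x (List.mem_cons_of_mem _ hx)
      rw [pvVal, List.foldl_cons]
      conv_lhs => whnf
      cases hh : c.isDigit with
      | false => rw [hh] at hdc; exact absurd hdc (by decide)
      | true =>
        conv_lhs => whnf
        simp only [show '0'.toNat = 48 from rfl]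
        generalize 0 * 10 + (c.toNat - 48) = a
        clear hne htrim hdc hh hd h1 h2 hrhs
        revert hdt
        revert a
        induction t with
        | nil => intro a _; rw [List.foldl_nil]; rfl
        | cons d t' ih =>
          intro a hdt
          rw [List.foldl_cons]
          conv_lhs => whnf
          cases hh : d.isDigit with
          | false => exact absurd (hdt d (List.mem_cons_self ..)) (by simp [hh])
          | true =>
            conv_lhs => whnf
            simp only [show '0'.toNat = 48 from rfl]
            exact ih _ (fun x hx => hdt x (List.mem_cons_of_mem _ hx))

theorem tdc_acc (f : Nat) : ∀ (n : Nat) (acc : List Char),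
    Nat.toDigitsCore 10 f n acc = Nat.toDigitsCore 10 f n [] ++ acc := by
  induction f with
  | zero => intro n acc; simp [Nat.toDigitsCore]
  | succ f ih =>
    intro n acc
    simp only [Nat.toDigitsCore]
    by_cases h : n / 10 = 0
    · simp [h]
    · simp only [h, if_false]
      rw [ih (n / 10) ((n % 10).digitChar :: acc), ih (n / 10) [(n % 10).digitChar]]
      simp

theorem tdc_fuel : ∀ (f f' n : Nat), n < f → n < f' →
    Nat.toDigitsCore 10 f n [] = Nat.toDigitsCore 10 f' n [] := by
  intro f
  induction f with
  | zero => intro f' n h; omega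
  | succ f ih =>
    intro f' n h h'
    cases f' with
    | zero => omega
    | succ f' =>
      simp only [Nat.toDigitsCore]
      by_cases hz : n / 10 = 0
      · simp [hz]
      · simp only [hz, if_false]
        have hn : 0 < n := by omega
        have hlt := Nat.div_lt_self hn (by norm_num : (1:Nat) < 10)
        rw [tdc_acc f, tdc_acc f', ih f' (n / 10) (by omega) (by omega)]

theorem td_small {m : Nat} (h : m < 10) : Nat.toDigits 10 m = [Nat.digitChar m] := by
  unfold Nat.toDigits
  simp only [Nat.toDigitsCore]
  have : m / 10 = 0 := Nat.div_eq_of_lt h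
  simp [this, Nat.mod_eq_of_lt h]

theorem td_step {m : Nat} (h : 10 ≤ m) :
    Nat.toDigits 10 m = Nat.toDigits 10 (m / 10) ++ [Nat.digitChar (m % 10)] := by
  unfold Nat.toDigits
  conv_lhs => simp only [Nat.toDigitsCore]
  have hz : ¬ m / 10 = 0 := by
    have h10 : (10:Nat)/10 ≤ m/10 := Nat.div_le_div_right h
    simp at h10; omega
  simp only [hz, if_false]
  rw [tdc_acc, tdc_fuel m (m / 10 + 1) (m / 10) (Nat.div_lt_self (by omega) (by norm_num)) (by omega)]

theorem dc_digit {d : Nat} (h : d < 10) : (Nat.digitChar d).isDigit = true := by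
  interval_cases d <;> decide

theorem dc_val {d : Nat} (h : d < 10) : (Nat.digitChar d).toNat - 48 = d := by
  interval_cases d <;> decide

theorem td_digits : ∀ (m : Nat), ∀ c ∈ Nat.toDigits 10 m, c.isDigit = true := by
  intro m
  induction m using Nat.strong_induction_on with
  | _ m ih =>
    intro c hc
    by_cases h : m < 10
    · rw [td_small h] at hc
      simp at hc
      exact hc ▸ dc_digit h
    · rw [td_step (by omega)] at hc
      rcases List.mem_append.mp hc with h1 | h2
      · exact ih (m / 10) (Nat.div_lt_self (by omega) (by norm_num)) c h1
      · simp at h2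
        exact h2 ▸ dc_digit (Nat.mod_lt _ (by norm_num))

theorem td_ne (m : Nat) : Nat.toDigits 10 m ≠ [] := by
  by_cases h : m < 10
  · rw [td_small h]; simp
  · rw [td_step (by omega)]; simp

theorem td_val : ∀ (m : Nat), pvVal (Nat.toDigits 10 m) = m := by
  intro m
  induction m using Nat.strong_induction_on with
  | _ m ih =>
    by_cases h : m < 10
    · rw [td_small h]
      simp [pvVal, dc_val h]
    · rw [td_step (by omega)]
      unfold pvVal
      rw [List.foldl_append]
      have := ih (m / 10) (Nat.div_lt_self (by omega) (by norm_num))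
      unfold pvVal at this
      rw [this]
      simp [dc_val (Nat.mod_lt _ (by norm_num : (0:Nat) < 10))]
      omega

theorem fold_acc (t : List Char) : ∀ (a : Nat),
    t.foldl (fun a c => a * 10 + (c.toNat - 48)) a
      = a * 10 ^ t.length + t.foldl (fun a c => a * 10 + (c.toNat - 48)) 0 := by
  induction t with
  | nil => intro a; simp
  | cons d t ih =>
    intro a
    rw [List.foldl_cons, ih (a * 10 + (d.toNat - 48)), List.foldl_cons, ih (0 * 10 + (d.toNat - 48))]
    simp [List.length_cons, pow_succ]
    ring

theorem digit_val_lt {c : Char} (h : c.isDigit = true) : c.toNat - 48 < 10 := by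
  simp [Char.isDigit] at h
  obtain ⟨h1, h2⟩ := h
  have : c.toNat ≤ 57 := Fin.mk_le_mk.mp h2
  omega

theorem val_bound : ∀ (t : List Char), (∀ c ∈ t, c.isDigit = true) →
    pvVal t < 10 ^ t.length := by
  intro t
  induction t with
  | nil => intro _; simp [pvVal]
  | cons d t ih =>
    intro hd
    unfold pvVal
    rw [List.foldl_cons, fold_acc]
    have hvt := ih (fun x hx => hd x (List.mem_cons_of_mem _ hx))
    unfold pvVal at hvt
    have hdlt : d.toNat - 48 < 10 := digit_val_lt (hd d (List.mem_cons_self ..))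
    have h1 : (0 * 10 + (d.toNat - 48)) * 10 ^ t.length ≤ 9 * 10 ^ t.length := by
      apply Nat.mul_le_mul_right; omega
    simp only [List.length_cons, pow_succ]
    omega

theorem td_len_le (m : Nat) (h1 : 1 ≤ m) : 10 ^ ((Nat.toDigits 10 m).length - 1) ≤ m := by
  induction m using Nat.strong_induction_on with
  | _ m ih =>
    by_cases h : m < 10
    · rw [td_small h]; simpa using h1
    · rw [td_step (by omega)]
      have hq : 1 ≤ m / 10 := Nat.le_div_iff_mul_le (by norm_num) |>.mpr (by omega)
      have := ih (m / 10) (Nat.div_lt_self (by omega) (by norm_num)) hq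
      have hne := td_ne (m / 10)
      have hlen : 1 ≤ (Nat.toDigits 10 (m / 10)).length := by
        cases hsh : Nat.toDigits 10 (m / 10) with
        | nil => exact absurd hsh hne
        | cons x xs => simp
      simp only [List.length_append, List.length_cons, List.length_nil]
      have hstep : 10 ^ ((Nat.toDigits 10 (m/10)).length + 1 - 1)
          = 10 * 10 ^ ((Nat.toDigits 10 (m/10)).length - 1) := by
        rw [Nat.add_sub_cancel]
        conv_lhs => rw [show (Nat.toDigits 10 (m/10)).length = ((Nat.toDigits 10 (m/10)).length - 1) + 1 by omega]
        rw [pow_succ]; ring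
      rw [hstep]
      calc 10 * 10 ^ ((Nat.toDigits 10 (m/10)).length - 1) ≤ 10 * (m / 10) := by
            exact Nat.mul_le_mul_left _ this
        _ ≤ m := Nat.mul_div_le m 10

-- Decomposition of str(m) for m ≥ 10: head digit and tail value.
theorem td_struct (m : Nat) (h : 10 ≤ m) :
    ∃ c t, Nat.toDigits 10 m = c :: t ∧ t ≠ [] ∧
      (∀ x ∈ (c :: t : List Char), x.isDigit = true) ∧
      c.toNat - 48 = m / 10 ^ t.length ∧
      pvVal t = m % 10 ^ t.length ∧
      10 ^ t.length ≤ m ∧ m < 10 ^ (t.length + 1) := by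
  cases hds : Nat.toDigits 10 m with
  | nil => exact absurd hds (td_ne m)
  | cons c t =>
    have hdig : ∀ x ∈ (c :: t : List Char), x.isDigit = true := by
      rw [← hds]; exact td_digits m
    have hv : pvVal (c :: t) = m := by rw [← hds]; exact td_val m
    have htne : t ≠ [] := by
      rintro rfl
      have := val_bound [c] hdig
      simp at this
      rw [hv] at this
      omega
    have hr : pvVal t < 10 ^ t.length := val_bound t (fun x hx => hdig x (List.mem_cons_of_mem _ hx))
    have hm : m = (c.toNat - 48) * 10 ^ t.length + pvVal t := by
      rw [← hv]
      unfold pvVal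
      rw [List.foldl_cons, fold_acc]
      simp
    have hqle : 10 ^ t.length ≤ m := by
      have := td_len_le m (by omega)
      rw [hds] at this
      simpa using this
    have hmlt : m < 10 ^ (t.length + 1) := by
      have := val_bound (c :: t) hdig
      rw [hv] at this
      simpa using this
    have hdivmod : m / 10 ^ t.length = c.toNat - 48 ∧ m % 10 ^ t.length = pvVal t := by
      constructor
      · rw [hm, Nat.add_comm, Nat.add_mul_div_right _ _ (Nat.pow_pos (by norm_num)),
          Nat.div_eq_of_lt hr]
        omega
      · rw [hm, Nat.add_comm, Nat.add_mul_mod_self_right, Nat.mod_eq_of_lt hr]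
    exact ⟨c, t, rfl, htne, hdig, hdivmod.1.symm, hdivmod.2.symm, hqle, hmlt⟩

-- findPFuel finds the largest power of ten ≤ m.
theorem findP_eq : ∀ (f : Nat) (m : Int) (j i : Nat),
    (10:Int)^j ≤ m → m < 10^(j+1) → i ≤ j → j - i ≤ f →
    findPFuel f m ((10:Int)^i) = 10^j := by
  intro f
  induction f with
  | zero =>
    intro m j i h1 h2 h3 h4
    have : i = j := by omega
    subst this
    rfl
  | succ f ih =>
    intro m j i h1 h2 h3 h4
    simp only [findPFuel]
    by_cases hle : (10:Int)^i * 10 ≤ m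
    · have hij : i < j := by
        by_contra hc
        have : i = j := by omega
        subst this
        rw [← pow_succ] at hle
        omega
      rw [if_pos hle, ← pow_succ]
      exact ih m j (i+1) h1 h2 (by omega) (by omega)
    · have hji : j ≤ i := by
        by_contra hc
        push_neg at hc
        have : (10:Int)^(i+1) ≤ 10^j := pow_le_pow_right₀ (by norm_num) (by omega)
        rw [pow_succ] at this
        omega
      have : i = j := by omega
      subst this
      rw [if_neg hle]

theorem tch (m : Nat) : PySem.Int.toChars ((m : Nat) : Int) = Nat.toDigits 10 m := by
  simp [PySem.Int.toChars]

-- A and B agree, fuel-independently, on every nonnegative value.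
theorem pv_main : ∀ (fa : Nat), ∀ (m : Nat) (fb : Nat) (dig : Int), m < fa → m < fb →
    continueRemFuel fa ((m : Nat) : Int) dig = altFuel fb ((m : Nat) : Int) dig := by
  intro fa
  induction fa with
  | zero => intro m fb dig h; omega
  | succ fa ih =>
    intro m fb dig hma hmb
    cases fb with
    | zero => omega
    | succ fb =>
      by_cases h10 : m < 10
      · -- single digit (or 0): both return (0 if m == dig else m)
        simp only [continueRemFuel, altFuel, tch, td_small h10]
        rw [pv_parse_digits _ (by simp) (by intro x hx; simp at hx; exact hx ▸ dc_digit h10)]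
        have hval : pvVal [Nat.digitChar m] = m := by
          simp [pvVal, dc_val h10]
        rw [hval, if_pos (show ((m:Nat):Int) < 10 by exact_mod_cast h10)]
        norm_num
      · -- m ≥ 10: peel the leading digit on both sides
        obtain ⟨c, t, hds, htne, hdig, hcv, htv, hqle, hmlt⟩ := td_struct m (by omega)
        simp only [continueRemFuel, altFuel, tch, hds]
        have hlt : 1 ≤ t.length := by
          cases t with
          | nil => exact absurd rfl htne
          | cons x xs => simp
        have hlen0 : ((c :: t).length == 0) = false := by simp
        have hlen1 : ((c :: t).length == 1) = false := by
          simp only [List.length_cons, beq_eq_false_iff_ne, ne_eq]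
          omega
        rw [hlen0, hlen1]
        simp only [Bool.false_eq_true, if_false]
        simp only [PySem.List.pyGet?_zero_cons]
        rw [pv_parse_digits [c] (by simp) (by intro x hx; simp at hx; exact hx ▸ hdig c (List.mem_cons_self ..))]
        have hc1 : pvVal [c] = m / 10 ^ t.length := by
          simp [pvVal]; omega
        rw [hc1]
        have hslice : PySem.List.slice (c :: t) (some 1) none = t := by
          have h1 : (1 : Int) = ((1:Nat) : Int) := by norm_cast
          rw [h1, PySem.List.slice_from_natCast]
          simp
        rw [hslice]
        rw [pv_parse_digits t htne (fun x hx => hdig x (List.mem_cons_of_mem _ hx))]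
        rw [htv]
        -- B side: the inner loop finds 10 ^ t.length
        rw [if_neg (by exact_mod_cast h10)]
        have hfp : findPFuel ((m : Nat) : Int).natAbs ((m : Nat) : Int) 1 = ((10 : Int) ^ t.length) := by
          have h1 : (1 : Int) = (10:Int)^(0:Nat) := by norm_num
          rw [Int.natAbs_natCast, h1]
          apply findP_eq m ((m : Nat) : Int) t.length 0
          · exact_mod_cast hqle
          · exact_mod_cast hmlt
          · omega
          · have : t.length < 10 ^ t.length := Nat.lt_pow_self (by norm_num)
            omega
        rw [hfp]
        have hpow : ((10:Int) ^ t.length) = ((10 ^ t.length : Nat) : Int) := by push_cast; ring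
        rw [hpow, PySem.Int.floordiv_natCast, PySem.Int.mod_natCast]
        rw [← hcv]
        conv_lhs => whnf
        cases hbd : ((((c.toNat - 48 : Nat) : Int)) == dig) with
        | true =>
          simp only [bne, hbd, Bool.not_true, Bool.false_eq_true, if_false]
          conv_lhs => whnf
          have hmod_lt : m % 10 ^ t.length < m := by
            have hp : 0 < 10 ^ t.length := Nat.pow_pos (by norm_num)
            have := Nat.mod_lt m hp
            omega
          exact ih (m % 10 ^ t.length) fb dig (by omega) (by omega)
        | false =>
          simp only [bne, hbd, Bool.not_false, if_true]
          conv_lhs => whnf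
          rfl

-- ===== VERDICT (by name: the statement is the Claim_ definition above) =====
theorem continueRem_spec : Claim_equal_continueRem := by
  intro item dig _ hpre
  unfold Spec_continueRem continueRem continueRem_alt
  unfold Pre_continueRem at hpre
  obtain ⟨m, rfl⟩ : ∃ m : Nat, item = ((m : Nat) : Int) := ⟨item.toNat, (Int.toNat_of_nonneg hpre).symm⟩
  rw [Int.natAbs_natCast]
  exact pv_main (m + 1) m (m + 1) dig (by omega) (by omega)
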